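-- pv_equiv track=rewrite | github.com/solntsevatv/BMSTU | C5/AA/labs/Lab_2/Work/algos.py | vinograd_mat_optimized
-- ===== SOURCE A (Python) =====
-- def vinograd_mat_optimized(result, mat_a, mat_b, n, k, m):
--     row_vec = [0] * n
--     col_vec = [0] * m
--     k_mod = k - k % 2
--     i = 0
--     while i < n:
--         j = 0
--         while j < k_mod:
--             row_vec[i] += mat_a[i][j] * mat_a[i][j + 1]
--             j += 2
--         i += 1
--
--     i = 0
--     while i < m:
--         j = 0
--         while j < k_mod:
--             col_vec[i] += mat_b[j][i] * mat_b[j + 1][i]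
--             j += 2
--         i += 1
--
--     i = 0
--     temp = 0
--     while i < n:
--         j = 0
--         while j < m:
--             # optimization temp buffer
--             temp = -row_vec[i] - col_vec[j]
--             l = 0
--             while l < k_mod:
--                 temp += (mat_a[i][l + 1] + mat_b[l][j]) *\
--                     (mat_a[i][l] + mat_b[l + 1][j])
--                 l += 2
--             result[i][j] = temp
--             j += 1
--         i += 1
--
--     if k % 2 == 1:
--         i = 0
--         k_min = k - 1
--         while i < n:
--             j = 0
--             while j < m:
--                 result[i][j] += mat_a[i][k_min] * mat_b[k_min][j]
--                 j += 1
--             i += 1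
--     return result
-- ===== SOURCE B (Python) =====
-- def vinograd_mat_optimized(result, mat_a, mat_b, n, k, m):
--     # Plain triple-loop matrix product: result[i][j] = sum(mat_a[i][l]*mat_b[l][j] for l in range(k)).
--     # Mutates and returns the same `result` argument, like the original.
--     for i in range(n):
--         for j in range(m):
--             s = 0
--             for l in range(k):
--                 s += mat_a[i][l] * mat_b[l][j]
--             result[i][j] = s
--     return result
-- ===== Notes on version B (the rewrite author's own statement) =====
-- stated objective: simpler
-- what changed: Replaces the Winograd scheme (row/col pair-product precomputation, halved inner loop over l, separate odd-k correction pass) with the plain triple-loop matrix product accumulating sum(mat_a[i][l]*mat_b[l][j] for l in range(k)) directly into result[i][j].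
-- outside the precondition, e.g. on vinograd_mat_optimized([[0]], [[1, 2]], [[3], [4]], 1, -1, 1): A returns [[3]], B returns [[0]]
import Mathlib
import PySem

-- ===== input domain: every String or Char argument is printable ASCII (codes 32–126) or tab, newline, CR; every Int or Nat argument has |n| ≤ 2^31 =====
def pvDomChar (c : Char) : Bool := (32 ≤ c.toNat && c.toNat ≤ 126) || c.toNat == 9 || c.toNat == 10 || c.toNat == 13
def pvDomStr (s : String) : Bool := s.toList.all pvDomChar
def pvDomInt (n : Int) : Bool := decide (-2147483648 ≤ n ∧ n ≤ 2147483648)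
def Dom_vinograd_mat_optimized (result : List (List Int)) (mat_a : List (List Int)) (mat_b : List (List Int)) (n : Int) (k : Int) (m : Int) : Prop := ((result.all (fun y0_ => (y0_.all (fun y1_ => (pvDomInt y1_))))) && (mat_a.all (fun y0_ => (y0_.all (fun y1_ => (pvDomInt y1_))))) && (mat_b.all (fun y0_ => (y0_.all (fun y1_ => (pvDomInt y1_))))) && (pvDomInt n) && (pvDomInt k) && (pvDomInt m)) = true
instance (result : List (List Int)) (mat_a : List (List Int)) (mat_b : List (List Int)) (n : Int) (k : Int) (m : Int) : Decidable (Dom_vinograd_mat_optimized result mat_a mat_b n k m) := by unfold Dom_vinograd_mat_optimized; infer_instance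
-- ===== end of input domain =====

-- B replaces A's Winograd pair-product scheme by the plain triple-loop matrix product (simpler, same
-- asymptotic cost).  Both Pythons mutate `result` in place identically; the theorems are about the
-- returned value.

-- ===== PORT A =====
-- shared indexing helpers: mat[i][j] read and result[i][j] = v write (indices are nonnegative and in
-- range on every admitted input, where pyGetD/set are exactly Python's indexing)
def pvGet2 (mat : List (List Int)) (i j : Int) : Int :=
  PySem.List.pyGetD (PySem.List.pyGetD mat i []) j 0

def pvSet2 (r : List (List Int)) (i j : Int) (v : Int) : List (List Int) :=
  r.set i.toNat ((PySem.List.pyGetD r i []).set j.toNat v)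

-- row_vec: row_vec[i] = sum over even j < k_mod of mat_a[i][j]*mat_a[i][j+1]
def pvRowVec (mat_a : List (List Int)) (n k_mod : Int) : List Int :=
  (PySem.List.pyRange 0 n 1).map (fun i =>
    (PySem.List.pyRange 0 k_mod 2).foldl
      (fun acc j => acc + pvGet2 mat_a i j * pvGet2 mat_a i (j + 1)) 0)

-- col_vec: col_vec[i] = sum over even j < k_mod of mat_b[j][i]*mat_b[j+1][i]
def pvColVec (mat_b : List (List Int)) (m k_mod : Int) : List Int :=
  (PySem.List.pyRange 0 m 1).map (fun i =>
    (PySem.List.pyRange 0 k_mod 2).foldl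
      (fun acc j => acc + pvGet2 mat_b j i * pvGet2 mat_b (j + 1) i) 0)

-- the temp accumulated for cell (i, j) in A's main loop
def pvTemp (mat_a mat_b : List (List Int)) (row_vec col_vec : List Int) (k_mod i j : Int) : Int :=
  (PySem.List.pyRange 0 k_mod 2).foldl
    (fun temp l =>
      temp + (pvGet2 mat_a i (l + 1) + pvGet2 mat_b l j) * (pvGet2 mat_a i l + pvGet2 mat_b (l + 1) j))
    (-(PySem.List.pyGetD row_vec i 0) - PySem.List.pyGetD col_vec j 0)

def vinograd_mat_optimized (result : List (List Int)) (mat_a : List (List Int)) (mat_b : List (List Int)) (n : Int) (k : Int) (m : Int) : List (List Int) :=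
  let k_mod := k - PySem.Int.mod k 2
  let row_vec := pvRowVec mat_a n k_mod
  let col_vec := pvColVec mat_b m k_mod
  let res1 := (PySem.List.pyRange 0 n 1).foldl (fun r i =>
    (PySem.List.pyRange 0 m 1).foldl (fun r j =>
      pvSet2 r i j (pvTemp mat_a mat_b row_vec col_vec k_mod i j)) r) result
  if PySem.Int.mod k 2 = 1 then
    let k_min := k - 1
    (PySem.List.pyRange 0 n 1).foldl (fun r i =>
      (PySem.List.pyRange 0 m 1).foldl (fun r j =>
        pvSet2 r i j (pvGet2 r i j + pvGet2 mat_a i k_min * pvGet2 mat_b k_min j)) r) res1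
  else res1

-- ===== PORT B =====
def vinograd_mat_optimized_alt (result : List (List Int)) (mat_a : List (List Int)) (mat_b : List (List Int)) (n : Int) (k : Int) (m : Int) : List (List Int) :=
  (PySem.List.pyRange 0 n 1).foldl (fun r i =>
    (PySem.List.pyRange 0 m 1).foldl (fun r j =>
      pvSet2 r i j ((PySem.List.pyRange 0 k 1).foldl
        (fun s l => s + pvGet2 mat_a i l * pvGet2 mat_b l j) 0)) r) result

-- ===== PRECONDITION & SPEC =====
-- Pre_ is the natural matrix-product domain: k (the shared dimension) is nonnegative — for negative
-- odd k A reads cells through Python negative-index wraparound (or raises), outside the function's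
-- meaning, while for even k ≤ 0 (both write plain zeros) or an empty n/m loop (nothing written)
-- the programs agree, so only odd k < 0 with 0 < n and 0 < m is excluded — and each matrix is large enough for exactly the cells A's loops touch (each
-- shape bound is guarded by the loop conditions under which A indexes that matrix; k.toNat/2*2 is
-- A's k_mod, the largest even index bound of the paired loops).
def Pre_vinograd_mat_optimized (result : List (List Int)) (mat_a : List (List Int)) (mat_b : List (List Int)) (n : Int) (k : Int) (m : Int) : Prop :=
  (0 ≤ k ∨ PySem.Int.mod k 2 = 0 ∨ n ≤ 0 ∨ m ≤ 0) ∧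
  (n ≤ 0 ∨ m ≤ 0 ∨
    (n ≤ (result.length : Int) ∧ ∀ row ∈ result.take n.toNat, m ≤ (row.length : Int))) ∧
  (n ≤ 0 ∨ k < 2 ∨
    (n ≤ (mat_a.length : Int) ∧ ∀ row ∈ mat_a.take n.toNat, 2 * (k.toNat / 2) ≤ row.length)) ∧
  (n ≤ 0 ∨ m ≤ 0 ∨ k ≤ 0 ∨
    (n ≤ (mat_a.length : Int) ∧ ∀ row ∈ mat_a.take n.toNat, k ≤ (row.length : Int))) ∧
  (m ≤ 0 ∨ k < 2 ∨
    (2 * (k.toNat / 2) ≤ mat_b.length ∧ ∀ row ∈ mat_b.take (2 * (k.toNat / 2)), m ≤ (row.length : Int))) ∧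
  (n ≤ 0 ∨ m ≤ 0 ∨ k ≤ 0 ∨
    (k ≤ (mat_b.length : Int) ∧ ∀ row ∈ mat_b.take k.toNat, m ≤ (row.length : Int)))

instance (result : List (List Int)) (mat_a : List (List Int)) (mat_b : List (List Int)) (n : Int) (k : Int) (m : Int) : Decidable (Pre_vinograd_mat_optimized result mat_a mat_b n k m) := by unfold Pre_vinograd_mat_optimized; infer_instance

def pvWitness_vinograd_mat_optimized : List (List Int) × List (List Int) × List (List Int) × Int × Int × Int :=
  ([[0, 0], [0, 0]], [[1, 2], [3, 4]], [[5, 6], [7, 8]], 2, 2, 2)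

def Spec_vinograd_mat_optimized (result : List (List Int)) (mat_a : List (List Int)) (mat_b : List (List Int)) (n : Int) (k : Int) (m : Int) (out : List (List Int)) : Prop := out = vinograd_mat_optimized_alt result mat_a mat_b n k m
instance (result : List (List Int)) (mat_a : List (List Int)) (mat_b : List (List Int)) (n : Int) (k : Int) (m : Int) (out : List (List Int)) : Decidable (Spec_vinograd_mat_optimized result mat_a mat_b n k m out) := by unfold Spec_vinograd_mat_optimized; infer_instance

-- ===== CLAIM (what is proved, stated in full; the proofs are below) =====
def Claim_equal_vinograd_mat_optimized : Prop := ∀ (result : List (List Int)) (mat_a : List (List Int)) (mat_b : List (List Int)) (n : Int) (k : Int) (m : Int), Dom_vinograd_mat_optimized result mat_a mat_b n k m → Pre_vinograd_mat_optimized result mat_a mat_b n k m → Spec_vinograd_mat_optimized result mat_a mat_b n k m (vinograd_mat_optimized result mat_a mat_b n k m)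

-- ===== LEMMAS AND PROOFS =====

theorem pvWitness_ok :
    Dom_vinograd_mat_optimized (pvWitness_vinograd_mat_optimized.1) (pvWitness_vinograd_mat_optimized.2.1) (pvWitness_vinograd_mat_optimized.2.2.1) (pvWitness_vinograd_mat_optimized.2.2.2.1) (pvWitness_vinograd_mat_optimized.2.2.2.2.1) (pvWitness_vinograd_mat_optimized.2.2.2.2.2) ∧
    Pre_vinograd_mat_optimized (pvWitness_vinograd_mat_optimized.1) (pvWitness_vinograd_mat_optimized.2.1) (pvWitness_vinograd_mat_optimized.2.2.1) (pvWitness_vinograd_mat_optimized.2.2.2.1) (pvWitness_vinograd_mat_optimized.2.2.2.2.1) (pvWitness_vinograd_mat_optimized.2.2.2.2.2) := by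
  decide

-- range-normalisation: any Python range(0, e) as a map over List.range
theorem pvRange_toNat (e : Int) :
    PySem.List.pyRange 0 e 1 = (List.range e.toNat).map (fun t : Nat => (t : Int)) := by
  rw [PySem.List.pyRange_one, Int.sub_zero]
  exact List.map_congr_left (fun a _ => by simp)

-- the step-2 range 0,2,…,2p-2
theorem pvRange_two (p : Nat) :
    PySem.List.pyRange 0 (2 * (p : Int)) 2 = (List.range p).map (fun t : Nat => 2 * (t : Int)) := by
  rw [PySem.List.pyRange_of_pos 0 (2 * (p : Int)) (by norm_num)]
  have h2 : ((2 * (p : Int) - 0 + 2 - 1) / 2).toNat = p := by omega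
  rcases Nat.eq_zero_or_pos p with hp | hp
  · subst hp; simp
  · rw [if_pos (by exact_mod_cast Nat.mul_pos (by norm_num) hp)]
    rw [h2]
    exact List.map_congr_left (fun a _ => by simp)

-- one inner while-loop over j: writing (a function of the old cell and the index) into cells 0..M-1 of a row
theorem pvInnerFold (u : Int → Int → Int → Int) (i : Int) : ∀ (M : Nat) (row : List Int), M ≤ row.length →
    ((List.range M).map (fun t : Nat => (t : Int))).foldl
      (fun row j => row.set j.toNat (u i (PySem.List.pyGetD row j 0) j)) row
    = row.mapIdx (fun j x => if j < M then u i x (j : Int) else x) := by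
  intro M
  induction M with
  | zero =>
    intro row _
    symm
    apply List.ext_getElem (by simp)
    intro t ht1 ht2
    simp [List.getElem_mapIdx]
  | succ M ih =>
    intro row hlen
    rw [List.range_succ, List.map_append, List.foldl_append]
    rw [ih row (by omega)]
    simp only [List.map_cons, List.map_nil, List.foldl_cons, List.foldl_nil]
    have hmlen : M < (row.mapIdx (fun j x => if j < M then u i x (j : Int) else x)).length := by
      simp; omega
    rw [PySem.List.pyGetD_ofNat _ M 0 hmlen]
    simp only [List.getElem_mapIdx]
    rw [if_neg (by omega : ¬ M < M)]
    apply List.ext_getElem (by simp)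
    intro t ht1 ht2
    simp only [List.length_set, List.length_mapIdx] at ht1
    rw [List.getElem_set]
    simp only [List.getElem_mapIdx, Int.toNat_natCast]
    by_cases hMt : M = t
    · subst hMt
      rw [if_pos rfl, if_pos (by omega)]
    · rw [if_neg hMt]
      by_cases htM : t < M
      · rw [if_pos htM, if_pos (by omega)]
      · rw [if_neg htM, if_neg (by omega)]

-- successive writes into the same row i of the matrix commute with List.set at i
theorem pvRowFold (u : Int → Int → Int → Int) (i : Int) (hi : 0 ≤ i) :
    ∀ (js : List Int) (r : List (List Int)), i.toNat < r.length →
    js.foldl (fun r j => r.set i.toNat ((PySem.List.pyGetD r i []).set j.toNat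
        (u i (PySem.List.pyGetD (PySem.List.pyGetD r i []) j 0) j))) r
    = r.set i.toNat (js.foldl (fun row j => row.set j.toNat (u i (PySem.List.pyGetD row j 0) j)) (PySem.List.pyGetD r i [])) := by
  have hcast : i = ((i.toNat : Nat) : Int) := (Int.toNat_of_nonneg hi).symm
  intro js
  induction js with
  | nil =>
    intro r hr
    simp only [List.foldl_nil]
    rw [hcast, PySem.List.pyGetD_ofNat _ _ _ hr]
    exact (List.set_getElem_self hr).symm
  | cons j js ih =>
    intro r hr
    simp only [List.foldl_cons]
    rw [ih _ (by simpa using hr)]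
    have hget : ∀ v : List Int, PySem.List.pyGetD (r.set i.toNat v) i [] = v := by
      intro v
      rw [hcast, PySem.List.pyGetD_ofNat _ _ _ (by simpa using hr)]
      rw [List.getElem_set, if_pos (by omega)]
    rw [hget, List.set_set]

-- one full double-loop pass: every cell (i, j), i < N, j < M, becomes u i (old value) j
theorem pvPassFold (u : Int → Int → Int → Int) (M : Nat) :
    ∀ (N : Nat) (r : List (List Int)), N ≤ r.length →
    (∀ (i : Nat) (h : i < r.length), i < N → M ≤ r[i].length) →
    ((List.range N).map (fun t : Nat => (t : Int))).foldl
      (fun r i => ((List.range M).map (fun t : Nat => (t : Int))).foldl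
        (fun r j => r.set i.toNat ((PySem.List.pyGetD r i []).set j.toNat
           (u i (PySem.List.pyGetD (PySem.List.pyGetD r i []) j 0) j))) r) r
    = r.mapIdx (fun i row => if i < N then row.mapIdx (fun j x => if j < M then u (i : Int) x (j : Int) else x) else row) := by
  intro N
  induction N with
  | zero =>
    intro r _ _
    symm
    apply List.ext_getElem (by simp)
    intro t ht1 ht2
    simp [List.getElem_mapIdx]
  | succ N ih =>
    intro r hN hrow
    rw [List.range_succ, List.map_append, List.foldl_append]
    rw [ih r (by omega) (fun i h hi => hrow i h (by omega))]
    simp only [List.map_cons, List.map_nil, List.foldl_cons, List.foldl_nil]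
    have hlen1 : ((N : Int)).toNat < (r.mapIdx (fun i row => if i < N then row.mapIdx (fun j x => if j < M then u (i : Int) x (j : Int) else x) else row)).length := by
      simp; omega
    rw [pvRowFold u (N : Int) (by positivity) _ _ hlen1]
    have hgetN : PySem.List.pyGetD (r.mapIdx (fun i row => if i < N then row.mapIdx (fun j x => if j < M then u (i : Int) x (j : Int) else x) else row)) ((N : Nat) : Int) []
        = r[N]'(by omega) := by
      have hlen1' : N < (r.mapIdx (fun i row => if i < N then row.mapIdx (fun j x => if j < M then u (i : Int) x (j : Int) else x) else row)).length := by
        simp; omega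
      rw [PySem.List.pyGetD_ofNat _ N _ hlen1']
      simp only [List.getElem_mapIdx]
      rw [if_neg (by omega : ¬ N < N)]
    rw [hgetN]
    rw [pvInnerFold u (N : Int) M (r[N]'(by omega)) (hrow N (by omega) (by omega))]
    apply List.ext_getElem (by simp)
    intro t ht1 ht2
    simp only [List.length_set, List.length_mapIdx] at ht1
    rw [List.getElem_set]
    simp only [List.getElem_mapIdx, Int.toNat_natCast]
    by_cases hNt : N = t
    · subst hNt
      rw [if_pos rfl, if_pos (by omega)]
    · rw [if_neg hNt]
      by_cases htN : t < N
      · rw [if_pos htN, if_pos (by omega)]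
      · rw [if_neg htN, if_neg (by omega)]

-- pass with a cell value independent of the old cell (A's main pass, B's only pass)
theorem pvPassConst (v : Int → Int → Int) (M N : Nat) (r : List (List Int))
    (h1 : N ≤ r.length) (h2 : ∀ (i : Nat) (h : i < r.length), i < N → M ≤ r[i].length) :
    ((List.range N).map (fun t : Nat => (t : Int))).foldl
      (fun r i => ((List.range M).map (fun t : Nat => (t : Int))).foldl
        (fun r j => pvSet2 r i j (v i j)) r) r
    = r.mapIdx (fun i row => if i < N then row.mapIdx (fun j x => if j < M then v (i : Int) (j : Int) else x) else row) :=
  pvPassFold (fun i _ j => v i j) M N r h1 h2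

-- pass incrementing each cell (A's odd-k correction pass)
theorem pvPassAdd (c : Int → Int → Int) (M N : Nat) (r : List (List Int))
    (h1 : N ≤ r.length) (h2 : ∀ (i : Nat) (h : i < r.length), i < N → M ≤ r[i].length) :
    ((List.range N).map (fun t : Nat => (t : Int))).foldl
      (fun r i => ((List.range M).map (fun t : Nat => (t : Int))).foldl
        (fun r j => pvSet2 r i j (pvGet2 r i j + c i j)) r) r
    = r.mapIdx (fun i row => if i < N then row.mapIdx (fun j x => if j < M then x + c (i : Int) (j : Int) else x) else row) :=
  pvPassFold (fun i x j => x + c i j) M N r h1 h2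

-- the Winograd rearrangement identity over the paired indices
theorem pvKey (α β : Int → Int) : ∀ (p : Nat),
    ((List.range p).map (fun t : Nat => (α (2 * (t : Int) + 1) + β (2 * (t : Int))) * (α (2 * (t : Int)) + β (2 * (t : Int) + 1)))).sum
      - ((List.range p).map (fun t : Nat => α (2 * (t : Int)) * α (2 * (t : Int) + 1))).sum
      - ((List.range p).map (fun t : Nat => β (2 * (t : Int)) * β (2 * (t : Int) + 1))).sum
    = ((List.range (2 * p)).map (fun l : Nat => α (l : Int) * β (l : Int))).sum := by
  intro p
  induction p with
  | zero => simp
  | succ p ih =>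
    have h2 : 2 * (p + 1) = (2 * p + 1) + 1 := by omega
    rw [h2, List.range_succ, List.range_succ, List.range_succ]
    simp only [List.map_append, List.sum_append, List.map_cons, List.map_nil, List.sum_cons,
      List.sum_nil]
    push_cast
    linear_combination ih

-- cell identity: A's temp for cell (i, j) (plus the odd-k correction term) is B's dot product
theorem pvCell (mat_a mat_b : List (List Int)) (n k m i j : Int) (K P : Nat)
    (hk : k = (K : Int)) (hP : P = K / 2) (hi : 0 ≤ i) (hin : i < n) (hj : 0 ≤ j) (hjm : j < m) :
    pvTemp mat_a mat_b (pvRowVec mat_a n (2 * (P : Int))) (pvColVec mat_b m (2 * (P : Int))) (2 * (P : Int)) i j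
      + (if K % 2 = 1 then pvGet2 mat_a i (k - 1) * pvGet2 mat_b (k - 1) j else 0)
    = (PySem.List.pyRange 0 k 1).foldl (fun s l => s + pvGet2 mat_a i l * pvGet2 mat_b l j) 0 := by
  have hkt : k.toNat = K := by omega
  unfold pvTemp pvRowVec pvColVec
  rw [PySem.List.pyGetD_map_pyRange_of_nonneg
    (fun i => (PySem.List.pyRange 0 (2 * (P : Int)) 2).foldl
      (fun acc jj => acc + pvGet2 mat_a i jj * pvGet2 mat_a i (jj + 1)) 0) n i 0 hi hin]
  rw [PySem.List.pyGetD_map_pyRange_of_nonneg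
    (fun i => (PySem.List.pyRange 0 (2 * (P : Int)) 2).foldl
      (fun acc jj => acc + pvGet2 mat_b jj i * pvGet2 mat_b (jj + 1) i) 0) m j 0 hj hjm]
  rw [pvRange_two P, pvRange_toNat k, hkt]
  rw [PySem.List.foldl_add ((List.range P).map (fun t : Nat => 2 * (t : Int)))
    (fun jj => pvGet2 mat_a i jj * pvGet2 mat_a i (jj + 1)) 0]
  rw [PySem.List.foldl_add ((List.range P).map (fun t : Nat => 2 * (t : Int)))
    (fun jj => pvGet2 mat_b jj j * pvGet2 mat_b (jj + 1) j) 0]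
  rw [PySem.List.foldl_add ((List.range P).map (fun t : Nat => 2 * (t : Int)))
    (fun l => (pvGet2 mat_a i (l + 1) + pvGet2 mat_b l j) * (pvGet2 mat_a i l + pvGet2 mat_b (l + 1) j))]
  rw [PySem.List.foldl_add ((List.range K).map (fun t : Nat => (t : Int)))
    (fun l => pvGet2 mat_a i l * pvGet2 mat_b l j) 0]
  simp only [List.map_map, Function.comp_def]
  have hkey := pvKey (fun l => pvGet2 mat_a i l) (fun l => pvGet2 mat_b l j) P
  simp only [] at hkey
  by_cases hodd : K % 2 = 1
  · rw [if_pos hodd, hk]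
    rw [show K = 2 * P + 1 by omega]
    rw [show ((2 * P + 1 : Nat) : Int) - 1 = 2 * (P : Int) by push_cast; ring]
    rw [List.range_succ, List.map_append, List.sum_append]
    simp only [List.map_cons, List.map_nil, List.sum_cons, List.sum_nil]
    push_cast
    linear_combination hkey
  · rw [if_neg hodd]
    rw [show K = 2 * P by omega]
    linear_combination hkey

-- pointwise-equal cell values give equal passes
theorem pvCellsEq (N M : Nat) (f g : Int → Int → Int) (r : List (List Int))
    (h : ∀ (i j : Nat), i < N → j < M → f (i : Int) (j : Int) = g (i : Int) (j : Int)) :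
    r.mapIdx (fun i row => if i < N then row.mapIdx (fun j x => if j < M then f (i : Int) (j : Int) else x) else row)
    = r.mapIdx (fun i row => if i < N then row.mapIdx (fun j x => if j < M then g (i : Int) (j : Int) else x) else row) := by
  apply List.ext_getElem (by simp)
  intro i h1 h2
  simp only [List.getElem_mapIdx]
  split_ifs with hiN
  · apply List.ext_getElem (by simp)
    intro j hj1 hj2
    simp only [List.getElem_mapIdx]
    split_ifs with hjM
    · exact h i j hiN hjM
    · rfl
  · rfl

-- a constant-value pass followed by an increment pass is one combined pass
theorem pvMapIdxTwice (N M : Nat) (f c : Int → Int → Int) (r : List (List Int)) :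
    (r.mapIdx (fun i row => if i < N then row.mapIdx (fun j x => if j < M then f (i : Int) (j : Int) else x) else row)).mapIdx
      (fun i row => if i < N then row.mapIdx (fun j x => if j < M then x + c (i : Int) (j : Int) else x) else row)
    = r.mapIdx (fun i row => if i < N then row.mapIdx (fun j x => if j < M then f (i : Int) (j : Int) + c (i : Int) (j : Int) else x) else row) := by
  apply List.ext_getElem (by simp)
  intro i h1 h2
  simp only [List.getElem_mapIdx]
  split_ifs with hiN
  · apply List.ext_getElem (by simp)
    intro j hj1 hj2
    simp only [List.getElem_mapIdx]
    split_ifs with hjM <;> rfl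
  · rfl

-- ===== VERDICT (by name: the statement is the Claim_ definition above) =====
theorem vinograd_mat_optimized_spec : Claim_equal_vinograd_mat_optimized := by
  intro result mat_a mat_b n k m _ hpre
  obtain ⟨hk01, hres, _, _, _, _⟩ := hpre
  show _ = vinograd_mat_optimized_alt result mat_a mat_b n k m
  by_cases hnm : 0 < n ∧ 0 < m
  case neg =>
    -- a loop dimension is empty: every pass leaves `result` untouched in both programs
    rw [vinograd_mat_optimized_alt, vinograd_mat_optimized]
    simp only [pvRange_toNat]
    rcases not_and_or.mp hnm with h | h
    · rw [show n.toNat = 0 by omega]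
      simp
    · rw [show m.toNat = 0 by omega]
      simp [List.foldl_fixed]
  case pos =>
  obtain ⟨hr, hrrow⟩ := (hres.resolve_left (by omega)).resolve_left (by omega)
  have h1 : n.toNat ≤ result.length := by omega
  have h2 : ∀ (i : Nat) (h : i < result.length), i < n.toNat → m.toNat ≤ result[i].length := by
    intro i h hi
    have hmem : result[i] ∈ result.take n.toNat := by
      rw [List.mem_take_iff_getElem]
      exact ⟨i, by omega, by simp⟩
    have := hrrow _ hmem
    omega
  by_cases hk : 0 ≤ k
  case neg =>
    -- even k < 0: every k-indexed loop is empty, both programs write plain zeros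
    have hmod0 : PySem.Int.mod k 2 = 0 := by
      rcases hk01 with h | h | h | h
      · exact absurd h hk
      · exact h
      · exact absurd hnm.1 (by omega)
      · exact absurd hnm.2 (by omega)
    rw [vinograd_mat_optimized_alt, vinograd_mat_optimized]
    simp only [hmod0, sub_zero]
    rw [if_neg (by norm_num)]
    simp only [pvRange_toNat]
    rw [pvPassConst (fun i j => pvTemp mat_a mat_b (pvRowVec mat_a n k) (pvColVec mat_b m k) k i j) m.toNat n.toNat result h1 h2]
    rw [pvPassConst (fun i j => ((List.range k.toNat).map (fun t : Nat => (t : Int))).foldl (fun s l => s + pvGet2 mat_a i l * pvGet2 mat_b l j) 0) m.toNat n.toNat result h1 h2]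
    refine pvCellsEq n.toNat m.toNat
      (fun i j => pvTemp mat_a mat_b (pvRowVec mat_a n k) (pvColVec mat_b m k) k i j)
      (fun i j => ((List.range k.toNat).map (fun t : Nat => (t : Int))).foldl (fun s l => s + pvGet2 mat_a i l * pvGet2 mat_b l j) 0)
      result ?_
    intro i j hiN hjM
    have he2 : PySem.List.pyRange 0 k 2 = [] := by
      rw [PySem.List.pyRange_of_pos 0 k (by norm_num), if_neg (by omega)]
      simp
    have he1 : k.toNat = 0 := by omega
    unfold pvTemp pvRowVec pvColVec
    rw [he2, he1]
    simp only [List.foldl_nil, List.range_zero, List.map_nil]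
    rw [PySem.List.pyGetD_map_pyRange_of_nonneg (fun _ => (0 : Int)) n (i : Int) 0 (by positivity) (by omega)]
    rw [PySem.List.pyGetD_map_pyRange_of_nonneg (fun _ => (0 : Int)) m (j : Int) 0 (by positivity) (by omega)]
    norm_num
  case pos =>
  have hK : k = ((k.toNat : Nat) : Int) := (Int.toNat_of_nonneg hk).symm
  have hmod : PySem.Int.mod k 2 = ((k.toNat % 2 : Nat) : Int) := by
    rw [hK]; exact PySem.Int.mod_natCast k.toNat 2
  have hkmod : k - PySem.Int.mod k 2 = 2 * ((k.toNat / 2 : Nat) : Int) := by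
    rw [hmod]; omega
  -- rewrite B
  rw [vinograd_mat_optimized_alt, vinograd_mat_optimized]
  simp only [pvRange_toNat]
  rw [pvPassConst (fun i j => ((List.range k.toNat).map (fun t : Nat => (t : Int))).foldl (fun s l => s + pvGet2 mat_a i l * pvGet2 mat_b l j) 0) m.toNat n.toNat result h1 h2]
  rw [hkmod]
  rw [pvPassConst (fun i j => pvTemp mat_a mat_b (pvRowVec mat_a n (2 * ((k.toNat / 2 : Nat) : Int))) (pvColVec mat_b m (2 * ((k.toNat / 2 : Nat) : Int))) (2 * ((k.toNat / 2 : Nat) : Int)) i j) m.toNat n.toNat result h1 h2]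
  by_cases hodd : k.toNat % 2 = 1
  · have hcond : PySem.Int.mod k 2 = 1 := by rw [hmod, hodd]; norm_num
    rw [if_pos hcond]
    rw [pvPassAdd (fun i j => pvGet2 mat_a i (k - 1) * pvGet2 mat_b (k - 1) j) m.toNat n.toNat _
      (by simpa using h1)
      (by intro i hlen hiN
          simp only [List.getElem_mapIdx] at *
          split_ifs
          all_goals simpa using h2 i (by simpa using hlen) hiN)]
    rw [pvMapIdxTwice n.toNat m.toNat
      (fun i j => pvTemp mat_a mat_b (pvRowVec mat_a n (2 * ((k.toNat / 2 : Nat) : Int))) (pvColVec mat_b m (2 * ((k.toNat / 2 : Nat) : Int))) (2 * ((k.toNat / 2 : Nat) : Int)) i j)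
      (fun i j => pvGet2 mat_a i (k - 1) * pvGet2 mat_b (k - 1) j) result]
    refine pvCellsEq n.toNat m.toNat
      (fun i j => pvTemp mat_a mat_b (pvRowVec mat_a n (2 * ((k.toNat / 2 : Nat) : Int))) (pvColVec mat_b m (2 * ((k.toNat / 2 : Nat) : Int))) (2 * ((k.toNat / 2 : Nat) : Int)) i j + pvGet2 mat_a i (k - 1) * pvGet2 mat_b (k - 1) j)
      (fun i j => ((List.range k.toNat).map (fun t : Nat => (t : Int))).foldl (fun s l => s + pvGet2 mat_a i l * pvGet2 mat_b l j) 0)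
      result ?_
    intro i j hiN hjM
    have hc := pvCell mat_a mat_b n k m (i : Int) (j : Int) k.toNat (k.toNat / 2) hK rfl
      (by positivity) (by omega) (by positivity) (by omega)
    rw [if_pos hodd] at hc
    rw [pvRange_toNat] at hc
    simpa using hc
  · have heven : k.toNat % 2 = 0 := by omega
    have hcond : ¬ PySem.Int.mod k 2 = 1 := by rw [hmod, heven]; norm_num
    rw [if_neg hcond]
    refine pvCellsEq n.toNat m.toNat
      (fun i j => pvTemp mat_a mat_b (pvRowVec mat_a n (2 * ((k.toNat / 2 : Nat) : Int))) (pvColVec mat_b m (2 * ((k.toNat / 2 : Nat) : Int))) (2 * ((k.toNat / 2 : Nat) : Int)) i j)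
      (fun i j => ((List.range k.toNat).map (fun t : Nat => (t : Int))).foldl (fun s l => s + pvGet2 mat_a i l * pvGet2 mat_b l j) 0)
      result ?_
    intro i j hiN hjM
    have hc := pvCell mat_a mat_b n k m (i : Int) (j : Int) k.toNat (k.toNat / 2) hK rfl
      (by positivity) (by omega) (by positivity) (by omega)
    rw [if_neg (by omega), add_zero] at hc
    rw [pvRange_toNat] at hc
    simpa using hc
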